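-- pv_equiv track=rewrite | github.com/cristianmerenda/progra3 | tpo-v1.1.py | moverIzq
-- ===== SOURCE A (Python) =====
-- def moverIzq(posiciones, jugadores, ji):
--     i = 0
--     j = ji
--     while  i < posiciones:
--         j -= 1
--         if j < 0:
--             j = len(jugadores) - 1
--         if jugadores[j] != -1:
--             i += 1
--     return j
-- ===== SOURCE B (Python) =====
-- def moverIzq(posiciones, jugadores, ji):
--     # Alternative: collect valid indices once, then jump with modular arithmetic.
--     if posiciones <= 0:
--         return ji
--     n = len(jugadores)
--     V = [i for i, x in enumerate(jugadores) if x != -1]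
--     k = len(V)
--     s = ji - 1 if ji >= 1 else n - 1
--     m = sum(1 for v in V if v <= s)
--     return V[(m - posiciones) % k]
-- ===== Notes on version B (the rewrite author's own statement) =====
-- stated objective: alternative
-- what changed: A walks the circle one cell per iteration counting valid players; B collects the valid indices in one pass and jumps straight to the answer with modular arithmetic (no step-by-step walk).
import Mathlib
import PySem

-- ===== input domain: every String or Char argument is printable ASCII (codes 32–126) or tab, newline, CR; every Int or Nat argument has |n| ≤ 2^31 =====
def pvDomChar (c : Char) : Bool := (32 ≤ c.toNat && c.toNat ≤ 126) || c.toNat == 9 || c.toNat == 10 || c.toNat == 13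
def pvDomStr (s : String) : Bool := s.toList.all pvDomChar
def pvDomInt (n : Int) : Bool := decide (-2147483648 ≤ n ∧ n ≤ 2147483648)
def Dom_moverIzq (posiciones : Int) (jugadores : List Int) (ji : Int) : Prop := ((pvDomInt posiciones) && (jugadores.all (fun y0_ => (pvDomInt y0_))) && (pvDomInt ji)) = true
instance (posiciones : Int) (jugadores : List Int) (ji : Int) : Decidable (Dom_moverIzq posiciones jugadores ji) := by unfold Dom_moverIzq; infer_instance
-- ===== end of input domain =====

-- B replaces A's step-by-step circular walk by one pass collecting the valid
-- indices followed by a single modular-arithmetic jump (objective: alternative).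

-- ===== PORT A =====
-- The while loop, ported with fuel; `none` = fuel exhausted or IndexError
-- (both unreachable under Pre_moverIzq; the fuel passed below always suffices there).
def moverIzqLoop (posiciones : Int) (jugadores : List Int) : Nat → Int → Int → Option Int
  | fuel, i, j =>
    if i < posiciones then
      match fuel with
      | 0 => none
      | fuel + 1 =>
        let j1 := j - 1
        let j2 := if j1 < 0 then (jugadores.length : Int) - 1 else j1
        match PySem.List.pyGet? jugadores j2 with
        | none => none
        | some x =>
          if x ≠ -1 then moverIzqLoop posiciones jugadores fuel (i + 1) j2
          else moverIzqLoop posiciones jugadores fuel i j2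
    else some j

def moverIzq (posiciones : Int) (jugadores : List Int) (ji : Int) : Int :=
  (moverIzqLoop posiciones jugadores
    ((posiciones.toNat + 1) * (jugadores.length + 1) + 1) 0 ji).getD 0

-- ===== PORT B =====
-- V = [i for i, x in enumerate(jugadores) if x != -1]
def validIdx (jugadores : List Int) : List Int :=
  ((PySem.List.enumerate jugadores).filter (fun q => decide (q.2 ≠ -1))).map (fun q => q.1)

def moverIzq_alt (posiciones : Int) (jugadores : List Int) (ji : Int) : Int :=
  if posiciones ≤ 0 then ji
  else
    let n : Int := jugadores.length
    let V := validIdx jugadores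
    let k : Int := V.length
    let s : Int := if ji ≥ 1 then ji - 1 else n - 1
    let m : Int := (V.filter (fun v => decide (v ≤ s))).length
    -- V[(m - posiciones) % k]; the index is in range whenever k > 0 (Pre_), so
    -- the `.getD 0` default is never used on admitted inputs
    (PySem.List.pyGet? V (PySem.Int.mod (m - posiciones) k)).getD 0

-- ===== PRECONDITION & SPEC =====
-- Pre_ excludes exactly the inputs where Python A does not return normally:
-- with posiciones > 0, ji > len(jugadores) raises IndexError on the first access,
-- and a list with no player ≠ -1 loops forever (or raises IndexError when empty).
def Pre_moverIzq (posiciones : Int) (jugadores : List Int) (ji : Int) : Prop :=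
  posiciones ≤ 0 ∨ (ji ≤ (jugadores.length : Int) ∧ ∃ x ∈ jugadores, x ≠ -1)
instance (posiciones : Int) (jugadores : List Int) (ji : Int) : Decidable (Pre_moverIzq posiciones jugadores ji) := by unfold Pre_moverIzq; infer_instance

def pvWitness_moverIzq : Int × List Int × Int := (3, [2, -1, 7, -1], 1)

def Spec_moverIzq (posiciones : Int) (jugadores : List Int) (ji : Int) (out : Int) : Prop := out = moverIzq_alt posiciones jugadores ji
instance (posiciones : Int) (jugadores : List Int) (ji : Int) (out : Int) : Decidable (Spec_moverIzq posiciones jugadores ji out) := by unfold Spec_moverIzq; infer_instance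

-- ===== CLAIM (what is proved, stated in full; the proofs are below) =====
def Claim_equal_moverIzq : Prop := ∀ (posiciones : Int) (jugadores : List Int) (ji : Int), Dom_moverIzq posiciones jugadores ji → Pre_moverIzq posiciones jugadores ji → Spec_moverIzq posiciones jugadores ji (moverIzq posiciones jugadores ji)

-- ===== LEMMAS AND PROOFS =====

-- proof-side abbreviations: the start cell examined from j, the count of valid
-- indices ≤ s, the previous valid cell from s, and the scan distance to it
def ssJ (jugadores : List Int) (j : Int) : Int :=
  if j ≥ 1 then j - 1 else (jugadores.length : Int) - 1

def vcnt (jugadores : List Int) (s : Int) : Int :=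
  ((validIdx jugadores).filter (fun v => decide (v ≤ s))).length

def predV (jugadores : List Int) (s : Int) : Int :=
  ((PySem.List.pyGet? (validIdx jugadores)
    ((vcnt jugadores s - 1) % ((validIdx jugadores).length : Int))).getD 0)

def ddist (jugadores : List Int) (s : Int) : Nat :=
  ((s - predV jugadores s) % (jugadores.length : Int)).toNat

lemma validIdx_eq (a : List Int) :
    validIdx a = ((List.range a.length).filter (fun t => decide (a.getD t 0 ≠ -1))).map
      (fun (t : Nat) => (t : Int)) := by
  unfold validIdx
  rw [PySem.List.enumerate_eq_map_pyRange (d := 0), List.filter_map, List.map_map]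
  simp only [PySem.List.len_eq, PySem.List.pyRange_zero_nat, List.filter_map, List.map_map]
  rw [List.filter_congr (q := fun t => decide (a.getD t 0 ≠ -1))
      (by intro k hk; simp [Function.comp])]
  apply List.map_congr_left
  intro t ht
  rfl

lemma filter_range_le (n u : Nat) (P : Nat → Bool) (hu : u < n) :
    ((List.range n).filter (fun t => P t && decide (t ≤ u))) = (List.range (u+1)).filter P := by
  have hn : n = (u+1) + (n - (u+1)) := by omega
  rw [hn, List.range_add, List.filter_append]
  have h2 : ((List.range (n - (u+1))).map (fun k => (u+1) + k)).filter (fun t => P t && decide (t ≤ u)) = [] := by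
    rw [List.filter_eq_nil_iff]
    intro t ht
    obtain ⟨k, hk, rfl⟩ := List.mem_map.mp ht
    simp
    omega
  rw [h2, List.append_nil]
  apply List.filter_congr
  intro t ht
  have : t ≤ u := by have := List.mem_range.mp ht; omega
  simp [this]

lemma filter_range_succ (u : Nat) (P : Nat → Bool) :
    (List.range (u+1)).filter P
      = (List.range u).filter P ++ (if P u then [u] else []) := by
  rw [List.range_succ, List.filter_append]
  simp [List.filter]
  split <;> simp_all

-- vcnt as a count over an initial segment of range
lemma vcnt_natCast (a : List Int) (u : Nat) (hu : u < a.length) :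
    vcnt a (u : Int)
      = (((List.range (u+1)).filter (fun t => decide (a.getD t 0 ≠ -1))).length : Int) := by
  unfold vcnt
  rw [validIdx_eq, List.filter_map, List.length_map, List.filter_filter]
  rw [List.filter_congr (q := fun t => decide (a.getD t 0 ≠ -1) && decide (t ≤ u))
      (by intro k hk; simp [Function.comp, Bool.and_comm])]
  rw [filter_range_le a.length u _ hu]

lemma mem_validIdx (a : List Int) (v : Int) :
    v ∈ validIdx a ↔ ∃ t : Nat, t < a.length ∧ a.getD t 0 ≠ -1 ∧ v = (t : Int) := by
  rw [validIdx_eq]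
  simp [List.mem_filter, List.mem_range]
  constructor
  · rintro ⟨t, ⟨ht, hp⟩, rfl⟩; exact ⟨t, ht, hp, rfl⟩
  · rintro ⟨t, ht, hp, rfl⟩; exact ⟨t, ⟨ht, hp⟩, rfl⟩

lemma length_validIdx_pos (a : List Int) (hex : ∃ x ∈ a, x ≠ -1) :
    0 < (validIdx a).length := by
  obtain ⟨x, hx, hne⟩ := hex
  obtain ⟨t, ht, rfl⟩ := List.mem_iff_getElem.mp hx
  have hmem : ((t : Nat) : Int) ∈ validIdx a := by
    rw [mem_validIdx]
    exact ⟨t, ht, by rwa [List.getD_eq_getElem a 0 ht], rfl⟩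
  exact List.length_pos_of_mem hmem

lemma vcnt_bounds (a : List Int) (s : Int) :
    0 ≤ vcnt a s ∧ vcnt a s ≤ ((validIdx a).length : Int) := by
  unfold vcnt
  constructor
  · positivity
  · exact_mod_cast List.length_filter_le _ _

lemma vcnt_top (a : List Int) (h : 0 < a.length) :
    vcnt a ((a.length : Int) - 1) = ((validIdx a).length : Int) := by
  unfold vcnt
  rw [List.filter_eq_self.mpr]
  intro v hv
  obtain ⟨t, ht, _, rfl⟩ := (mem_validIdx a v).mp hv
  simp
  omega

lemma range_filter_split (n u : Nat) (P : Nat → Bool) (hu : u < n) :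
    ∃ rest : List Nat, (List.range n).filter P = (List.range (u+1)).filter P ++ rest := by
  have hn : n = (u+1) + (n - (u+1)) := by omega
  rw [hn, List.range_add, List.filter_append]
  exact ⟨_, rfl⟩

lemma predV_valid (a : List Int) (u : Nat) (hu : u < a.length) (hv : a.getD u 0 ≠ -1) :
    PySem.List.pyGet? (validIdx a) ((vcnt a (u : Int) - 1) % ((validIdx a).length : Int))
      = some (u : Int) := by
  set P : Nat → Bool := fun t => decide (a.getD t 0 ≠ -1) with hP
  have hPu : P u = true := by simp only [hP, decide_eq_true_eq]; exact hv
  obtain ⟨rest, hsplit⟩ := range_filter_split a.length u P hu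
  have hsucc : (List.range (u+1)).filter P = (List.range u).filter P ++ [u] := by
    rw [filter_range_succ, hPu]; rfl
  have hL : (List.range a.length).filter P = (List.range u).filter P ++ [u] ++ rest := by
    rw [hsplit, hsucc]
  set B1 := (List.range u).filter P with hB1
  have hc : vcnt a (u : Int) = (B1.length : Int) + 1 := by
    rw [vcnt_natCast a u hu, hsucc]
    simp
  have hk : (validIdx a).length = B1.length + 1 + rest.length := by
    rw [validIdx_eq, List.length_map, hL]
    simp
    omega
  have hidx : (vcnt a (u : Int) - 1) % ((validIdx a).length : Int) = (B1.length : Int) := by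
    rw [hc, hk]
    rw [show ((B1.length : Int) + 1 - 1) = (B1.length : Int) by ring]
    rw [Int.emod_eq_of_lt (by positivity) (by push_cast; omega)]
  rw [hidx]
  have hV : validIdx a = (B1.map (fun (t : Nat) => (t : Int))) ++ ((u : Int) :: rest.map (fun (t : Nat) => (t : Int))) := by
    rw [validIdx_eq, hL]
    simp
  rw [hV]
  have : ((B1.length : Nat) : Int) = ((B1.map (fun (t : Nat) => (t : Int))).length : Int) := by simp
  rw [this, PySem.List.pyGet?_natCast]
  rw [List.getElem?_append_right (le_refl _)]
  simp

lemma vcnt_succ (a : List Int) (u : Nat) (hu : u < a.length) (h1 : 1 ≤ u) :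
    vcnt a (u : Int)
      = vcnt a ((u : Int) - 1) + (if a.getD u 0 ≠ -1 then 1 else 0) := by
  have hu1 : u - 1 < a.length := by omega
  have hcast : ((u : Int) - 1) = ((u - 1 : Nat) : Int) := by push_cast [h1]; ring
  rw [hcast, vcnt_natCast a u hu, vcnt_natCast a (u-1) hu1]
  have : u - 1 + 1 = u := by omega
  rw [this]
  rw [filter_range_succ u]
  split <;> rename_i h <;> simp_all

lemma vcnt_zero (a : List Int) (h : 0 < a.length) :
    vcnt a 0 = (if a.getD 0 0 ≠ -1 then 1 else 0) := by
  have := vcnt_natCast a 0 h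
  rw [show ((0 : Nat) : Int) = (0 : Int) by rfl] at this
  rw [this]
  rw [show (0 + 1) = 1 by rfl, List.range_one]
  simp [List.filter]
  split <;> rename_i hsp <;> simp_all

lemma predV_mem (a : List Int) (s : Int) (hex : ∃ x ∈ a, x ≠ -1) :
    predV a s ∈ validIdx a := by
  unfold predV
  have hk := length_validIdx_pos a hex
  have hb := vcnt_bounds a s
  have hnn : 0 ≤ (vcnt a s - 1) % ((validIdx a).length : Int) :=
    Int.emod_nonneg _ (by positivity)
  have hlt : (vcnt a s - 1) % ((validIdx a).length : Int) < ((validIdx a).length : Int) :=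
    Int.emod_lt_of_pos _ (by exact_mod_cast hk)
  rw [PySem.List.pyGet?_of_nonneg (h := hnn)]
  have hlt' : ((vcnt a s - 1) % ((validIdx a).length : Int)).toNat < (validIdx a).length := by
    omega
  rw [List.getElem?_eq_getElem hlt']
  exact List.getElem_mem _

lemma predV_congr (a : List Int) (s1 s2 : Int) (h : vcnt a s1 = vcnt a s2) :
    predV a s1 = predV a s2 := by
  unfold predV
  rw [h]

lemma emod_shift (x n : Int) : (x + n) % n = x % n := by
  rw [show x + n = x + n * 1 by ring]
  exact Int.add_mul_emod_self_left ..

lemma ddist_lt (a : List Int) (s : Int) (h : 0 < a.length) :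
    ddist a s < a.length := by
  unfold ddist
  have := Int.emod_lt_of_pos (s - predV a s) (b := (a.length : Int)) (by exact_mod_cast h)
  omega

lemma ddist_valid (a : List Int) (u : Nat) (hu : u < a.length) (hv : a.getD u 0 ≠ -1) :
    ddist a (u : Int) = 0 := by
  unfold ddist predV
  rw [predV_valid a u hu hv]
  simp

lemma predV_spec (a : List Int) (s : Int) (hex : ∃ x ∈ a, x ≠ -1) :
    ∃ t : Nat, t < a.length ∧ a.getD t 0 ≠ -1 ∧ predV a s = (t : Int) :=
  (mem_validIdx a _).mp (predV_mem a s hex)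

lemma ddist_step_invalid (a : List Int) (u : Nat) (hu : u < a.length) (h1 : 1 ≤ u)
    (hv : a.getD u 0 = -1) (hex : ∃ x ∈ a, x ≠ -1) :
    1 ≤ ddist a (u : Int) ∧ ddist a ((u : Int) - 1) = ddist a (u : Int) - 1 := by
  have hn : 0 < a.length := by omega
  obtain ⟨t, ht, hvt, hq⟩ := predV_spec a (u : Int) hex
  have hne : (t : Int) ≠ (u : Int) := by
    intro h
    have : t = u := by exact_mod_cast h
    rw [this] at hvt; exact hvt hv
  have hveq : vcnt a ((u : Int) - 1) = vcnt a (u : Int) := by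
    rw [vcnt_succ a u hu h1, if_neg (not_not_intro hv), add_zero]
  have hpeq : predV a ((u : Int) - 1) = predV a (u : Int) := predV_congr _ _ _ hveq
  unfold ddist
  rw [hpeq, hq]
  have hnpos : (0 : Int) < (a.length : Int) := by exact_mod_cast hn
  have htb : (0 : Int) ≤ (t : Int) ∧ (t : Int) < (a.length : Int) := by
    constructor
    · positivity
    · exact_mod_cast ht
  rcases lt_or_gt_of_ne hne with hlt | hgt
  · -- t < u
    have e1 : ((u : Int) - t) % (a.length : Int) = (u : Int) - t :=
      Int.emod_eq_of_lt (by omega) (by omega)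
    have e2 : ((u : Int) - 1 - t) % (a.length : Int) = (u : Int) - 1 - t :=
      Int.emod_eq_of_lt (by omega) (by omega)
    rw [e1, e2]
    omega
  · -- t > u
    have e1 : ((u : Int) - t) % (a.length : Int) = (u : Int) - t + (a.length : Int) := by
      rw [← emod_shift ((u : Int) - t) (a.length : Int)]
      exact Int.emod_eq_of_lt (by omega) (by omega)
    have e2 : ((u : Int) - 1 - t) % (a.length : Int) = (u : Int) - 1 - t + (a.length : Int) := by
      rw [← emod_shift ((u : Int) - 1 - t) (a.length : Int)]
      exact Int.emod_eq_of_lt (by omega) (by omega)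
    rw [e1, e2]
    omega

lemma ddist_zero_invalid (a : List Int) (h : 0 < a.length) (hv : a.getD 0 0 = -1)
    (hex : ∃ x ∈ a, x ≠ -1) :
    1 ≤ ddist a 0 ∧ ddist a ((a.length : Int) - 1) = ddist a 0 - 1 := by
  have hk := length_validIdx_pos a hex
  have hkpos : (0 : Int) < ((validIdx a).length : Int) := by exact_mod_cast hk
  have hveq : vcnt a ((a.length : Int) - 1) = ((validIdx a).length : Int) := vcnt_top a h
  have hv0 : vcnt a 0 = 0 := by
    rw [vcnt_zero a h, if_neg (not_not_intro hv)]
  have hidx : (vcnt a 0 - 1) % ((validIdx a).length : Int)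
      = (vcnt a ((a.length : Int) - 1) - 1) % ((validIdx a).length : Int) := by
    rw [hv0, hveq]
    rw [show (0 : Int) - 1
        = (((validIdx a).length : Int) - 1) - ((validIdx a).length : Int) * 1 by ring]
    rw [Int.sub_mul_emod_self_left]
  have hpeq : predV a ((a.length : Int) - 1) = predV a 0 := by
    unfold predV
    rw [hidx]
  obtain ⟨t, ht, hvt, hq⟩ := predV_spec a 0 hex
  have ht1 : 1 ≤ t := by
    rcases Nat.eq_zero_or_pos t with h0 | h0
    · rw [h0] at hvt; exact absurd hv hvt
    · exact h0
  unfold ddist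
  rw [hpeq, hq]
  have hnpos : (0 : Int) < (a.length : Int) := by exact_mod_cast h
  have htb : (1 : Int) ≤ (t : Int) ∧ (t : Int) < (a.length : Int) := by
    constructor
    · exact_mod_cast ht1
    · exact_mod_cast ht
  have e1 : ((0 : Int) - t) % (a.length : Int) = (a.length : Int) - t := by
    rw [← emod_shift ((0 : Int) - t) (a.length : Int)]
    rw [Int.emod_eq_of_lt (by omega) (by omega)]
    ring
  have e2 : ((a.length : Int) - 1 - t) % (a.length : Int) = (a.length : Int) - 1 - t :=
    Int.emod_eq_of_lt (by omega) (by omega)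
  rw [e1, e2]
  omega

lemma idx_valid_step (a : List Int) (u : Nat) (hu : u < a.length)
    (hv : a.getD u 0 ≠ -1) (hex : ∃ x ∈ a, x ≠ -1) (r : Int) :
    (vcnt a (ssJ a (u : Int)) - (r - 1)) % ((validIdx a).length : Int)
      = (vcnt a (u : Int) - r) % ((validIdx a).length : Int) := by
  by_cases h1 : 1 ≤ u
  · have hss : ssJ a (u : Int) = (u : Int) - 1 := by
      unfold ssJ; rw [if_pos (by exact_mod_cast h1)]
    have hsucc := vcnt_succ a u hu h1
    rw [if_pos hv] at hsucc
    rw [hss]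
    congr 1
    omega
  · have hu0 : u = 0 := by omega
    subst hu0
    have hss : ssJ a ((0 : Nat) : Int) = (a.length : Int) - 1 := by
      unfold ssJ; rw [if_neg (by simp)]
    have hz := vcnt_zero a hu
    rw [if_pos hv] at hz
    rw [hss, vcnt_top a hu, Nat.cast_zero, hz]
    rw [show ((validIdx a).length : Int) - (r - 1)
        = (1 - r) + ((validIdx a).length : Int) by ring]
    rw [emod_shift]

lemma idx_invalid_step (a : List Int) (u : Nat) (hu : u < a.length)
    (hv : a.getD u 0 = -1) (hex : ∃ x ∈ a, x ≠ -1) (r : Int) :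
    (vcnt a (ssJ a (u : Int)) - r) % ((validIdx a).length : Int)
      = (vcnt a (u : Int) - r) % ((validIdx a).length : Int) := by
  by_cases h1 : 1 ≤ u
  · have hss : ssJ a (u : Int) = (u : Int) - 1 := by
      unfold ssJ; rw [if_pos (by exact_mod_cast h1)]
    have hsucc := vcnt_succ a u hu h1
    rw [if_neg (not_not_intro hv), add_zero] at hsucc
    rw [hss, ← hsucc]
  · have hu0 : u = 0 := by omega
    subst hu0
    have hss : ssJ a ((0 : Nat) : Int) = (a.length : Int) - 1 := by
      unfold ssJ; rw [if_neg (by simp)]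
    have hz := vcnt_zero a hu
    rw [if_neg (not_not_intro hv)] at hz
    rw [hss, vcnt_top a hu, Nat.cast_zero, hz]
    rw [show ((validIdx a).length : Int) - r = (0 - r) + ((validIdx a).length : Int) by ring]
    rw [emod_shift]

lemma ssJ_natCast_pos (a : List Int) (u : Nat) (h1 : 1 ≤ u) :
    ssJ a ((u : Nat) : Int) = ((u - 1 : Nat) : Int) := by
  unfold ssJ
  rw [if_pos (by exact_mod_cast h1)]
  omega

lemma ssJ_natCast_zero (a : List Int) :
    ssJ a ((0 : Nat) : Int) = (a.length : Int) - 1 := by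
  unfold ssJ
  rw [if_neg (by simp)]

lemma loop_formula (p : Int) (a : List Int) :
    ∀ (fuel : Nat) (i j : Int), (∃ x ∈ a, x ≠ -1) → i < p → j ≤ (a.length : Int) →
    ((p - i).toNat - 1) * a.length + ddist a (ssJ a j) < fuel →
    moverIzqLoop p a fuel i j =
      PySem.List.pyGet? (validIdx a)
        ((vcnt a (ssJ a j) - (p - i)) % ((validIdx a).length : Int)) := by
  intro fuel
  induction fuel with
  | zero => intro i j _ _ _ hf; omega
  | succ f IH =>
    intro i j hex hi hj hf
    have hn : 0 < a.length := by
      obtain ⟨x, hx, _⟩ := hex; exact List.length_pos_of_mem hx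
    have hs : (if j - 1 < 0 then (a.length : Int) - 1 else j - 1) = ssJ a j := by
      unfold ssJ; split_ifs <;> omega
    have hsb : 0 ≤ ssJ a j ∧ ssJ a j < (a.length : Int) := by
      unfold ssJ; split_ifs <;> omega
    obtain ⟨u, hu⟩ : ∃ u : Nat, ssJ a j = (u : Int) := ⟨(ssJ a j).toNat, by omega⟩
    have hut : u < a.length := by omega
    have hget : PySem.List.pyGet? a (ssJ a j) = some (a.getD u 0) := by
      rw [hu, PySem.List.pyGet?_natCast]
      rw [List.getElem?_eq_getElem hut]
      rw [List.getD_eq_getElem a 0 hut]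
    rw [moverIzqLoop.eq_def]
    simp only [if_pos hi, hs, hget]
    rw [hu] at hf ⊢
    by_cases hv : a.getD u 0 = -1
    · -- skipped cell
      rw [if_neg (not_not_intro hv)]
      rw [IH i ((u : Nat) : Int) hex hi (by omega) ?_]
      · exact congrArg (PySem.List.pyGet? (validIdx a)) (idx_invalid_step a u hut hv hex (p - i))
      · -- fuel bound
        by_cases h1 : 1 ≤ u
        · have hdd := ddist_step_invalid a u hut h1 hv hex
          rw [ssJ_natCast_pos a u h1]
          have hcast : (((u - 1 : Nat)) : Int) = (u : Int) - 1 := by omega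
          rw [hcast]
          omega
        · have hu0 : u = 0 := by omega
          subst hu0
          have hdd := ddist_zero_invalid a hn (by exact hv) hex
          rw [ssJ_natCast_zero a]
          simp only [Nat.cast_zero] at hf
          omega
    · -- counted cell
      rw [if_pos hv]
      by_cases hip : i + 1 < p
      · rw [IH (i+1) ((u : Nat) : Int) hex hip (by omega) ?_]
        · rw [show p - (i + 1) = (p - i) - 1 by ring]
          exact congrArg (PySem.List.pyGet? (validIdx a)) (idx_valid_step a u hut hv hex (p - i))
        · -- fuel bound
          have hdd0 : ddist a ((u : Nat) : Int) = 0 := ddist_valid a u hut hv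
          have hdd' : ddist a (ssJ a ((u : Nat) : Int)) < a.length := ddist_lt a _ hn
          have hA2 : 2 ≤ (p - i).toNat := by omega
          have hA1 : (p - (i+1)).toNat = (p - i).toNat - 1 := by omega
          have hmul : ((p - i).toNat - 1) * a.length
              = ((p - i).toNat - 2) * a.length + a.length := by
            rw [show (p - i).toNat - 1 = ((p - i).toNat - 2) + 1 by omega, Nat.succ_mul]
          rw [hA1, show (p - i).toNat - 1 - 1 = (p - i).toNat - 2 by omega]
          omega
      · have hp1 : p = i + 1 := by omega
        rw [moverIzqLoop.eq_def]
        simp only [if_neg (show ¬ (i + 1 < p) by omega)]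
        rw [show p - i = 1 by omega]
        exact (predV_valid a u hut hv).symm

-- ===== VERDICT (by name: the statement is the Claim_ definition above) =====
theorem moverIzq_spec : Claim_equal_moverIzq := by
  intro p a ji hdom hpre
  unfold Spec_moverIzq moverIzq moverIzq_alt
  by_cases hp : p ≤ 0
  · rw [moverIzqLoop.eq_def]
    simp only [if_neg (show ¬ ((0 : Int) < p) by omega), if_pos hp]
    rfl
  · rw [if_neg hp]
    obtain ⟨hji, hex⟩ := hpre.resolve_left hp
    have hn : 0 < a.length := by
      obtain ⟨x, hx, _⟩ := hex; exact List.length_pos_of_mem hx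
    have hk : 0 < (validIdx a).length := length_validIdx_pos a hex
    rw [loop_formula p a _ 0 ji hex (by omega) hji ?_]
    · show (PySem.List.pyGet? (validIdx a)
            ((vcnt a (ssJ a ji) - (p - 0)) % ((validIdx a).length : Int))).getD 0
          = (PySem.List.pyGet? (validIdx a)
            (PySem.Int.mod (vcnt a (ssJ a ji) - p) ((validIdx a).length : Int))).getD 0
      rw [PySem.Int.mod_eq_emod_of_pos
            (show (0 : Int) < ((validIdx a).length : Int) by exact_mod_cast hk),
          show p - 0 = p by ring]
    · have hd := ddist_lt a (ssJ a ji) hn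
      have hmul : (p.toNat - 1) * a.length ≤ p.toNat * a.length :=
        Nat.mul_le_mul_right _ (by omega)
      have hexp : (p.toNat + 1) * (a.length + 1)
          = p.toNat * a.length + p.toNat + a.length + 1 := by ring
      rw [show p - 0 = p by ring]
      omega
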